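-- pv_equiv track=rewrite | github.com/nyimbi/appp_gen | src/gen2.py | get_display_column
-- ===== SOURCE A (Python) =====
-- def get_display_column(column_name_list):
--     priorities = ["name", "alias", "title", "label", "display_name", "code"]
--
--     for name in priorities:
--         if name in column_name_list:
--             return name
--
--     for name in column_name_list:
--         if "name" in name.lower() or "model" in name.lower():
--             return name
--
--     return column_name_list[0]
-- ===== SOURCE B (Python) =====
-- def get_display_column(column_name_list):
--     prio_index = {"name": 0, "alias": 1, "title": 2, "label": 3,
--                   "display_name": 4, "code": 5}
--     best = None   # (priority index, column) with the smallest index seen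
--     sub = None    # first column whose lowercase contains 'name' or 'model'
--     for col in column_name_list:
--         i = prio_index.get(col)
--         if i is not None and (best is None or i < best[0]):
--             best = (i, col)
--         if sub is None and ("name" in col.lower() or "model" in col.lower()):
--             sub = col
--     if best is not None:
--         return best[1]
--     if sub is not None:
--         return sub
--     return column_name_list[0]
-- ===== Notes on version B (the rewrite author's own statement) =====
-- stated objective: alternative
-- what changed: Replaces A's two sequential scans (priority list against the columns, then a substring scan) by a single indexed pass over the columns that keeps the exact match with the smallest priority index and the first substring match, resolving precedence after the loop.
import Mathlib
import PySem

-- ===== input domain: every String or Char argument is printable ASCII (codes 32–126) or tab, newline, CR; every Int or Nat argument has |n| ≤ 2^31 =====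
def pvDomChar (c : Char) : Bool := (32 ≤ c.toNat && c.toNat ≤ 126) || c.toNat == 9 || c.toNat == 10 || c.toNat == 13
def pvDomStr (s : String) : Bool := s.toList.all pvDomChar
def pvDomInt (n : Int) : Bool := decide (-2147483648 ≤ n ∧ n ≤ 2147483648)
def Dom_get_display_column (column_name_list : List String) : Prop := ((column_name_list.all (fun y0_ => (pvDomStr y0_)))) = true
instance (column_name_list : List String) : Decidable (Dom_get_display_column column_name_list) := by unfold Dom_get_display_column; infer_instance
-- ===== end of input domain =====

-- B replaces A's two sequential scans by one indexed pass over the columns; objective: alternative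
-- (same cost class, genuinely different traversal). Return-value equivalence on nonempty lists;
-- both A and B raise IndexError on [] (excluded by Pre_).

-- ===== PORT A =====
def pvCondA (name : String) : Bool :=
  PySem.Str.isIn "name" (PySem.Str.lower name) || PySem.Str.isIn "model" (PySem.Str.lower name)

def pvPriorities : List String := ["name", "alias", "title", "label", "display_name", "code"]

-- first loop of A: scan the priority list for one that is a member of the columns
def pvPhase1 : List String → List String → Option String
  | [], _ => none
  | p :: ps, l => if l.contains p then some p else pvPhase1 ps l

-- second loop of A: first column whose lowercase contains "name" or "model"
def pvPhase2 : List String → Option String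
  | [] => none
  | x :: xs => if pvCondA x then some x else pvPhase2 xs

def get_display_column (column_name_list : List String) : String :=
  match pvPhase1 pvPriorities column_name_list with
  | some p => p
  | none =>
    match pvPhase2 column_name_list with
    | some x => x
    | none => (PySem.List.pyGet? column_name_list 0).getD ""  -- l[0]; none (IndexError) only on [], outside Pre_

-- ===== PORT B =====
def pvCondB (col : String) : Bool :=
  PySem.Str.isIn "name" (PySem.Str.lower col) || PySem.Str.isIn "model" (PySem.Str.lower col)

def pvPrioDict : PySem.Dict String Nat :=
  PySem.Dict.mk [("name", 0), ("alias", 1), ("title", 2), ("label", 3), ("display_name", 4), ("code", 5)]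

-- the single pass of Source B: best = exact match with smallest priority index, sub = first substring match
def pvLoopB : List String → Option (Nat × String) → Option String → Option (Nat × String) × Option String
  | [], best, sub => (best, sub)
  | col :: rest, best, sub =>
    let best' :=
      match pvPrioDict.get? col with
      | some i =>
        match best with
        | none => some (i, col)
        | some b => if i < b.1 then some (i, col) else best
      | none => best
    let sub' :=
      match sub with
      | some _ => sub
      | none => if pvCondB col then some col else none
    pvLoopB rest best' sub'

def get_display_column_alt (column_name_list : List String) : String :=
  match pvLoopB column_name_list none none with
  | (some b, _) => b.2
  | (none, some x) => x
  | (none, none) => (PySem.List.pyGet? column_name_list 0).getD ""  -- l[0]; none (IndexError) only on [], outside Pre_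

-- ===== PRECONDITION & SPEC =====
-- Pre_ excludes only the empty list, on which both A and B raise IndexError at column_name_list[0].
def Pre_get_display_column (column_name_list : List String) : Prop := column_name_list ≠ []
instance (column_name_list : List String) : Decidable (Pre_get_display_column column_name_list) := by
  unfold Pre_get_display_column; infer_instance

def pvWitness_get_display_column : List String := (["id", "title"])

def Spec_get_display_column (column_name_list : List String) (out : String) : Prop := out = get_display_column_alt column_name_list
instance (column_name_list : List String) (out : String) : Decidable (Spec_get_display_column column_name_list out) := by unfold Spec_get_display_column; infer_instance

-- ===== CLAIM (what is proved, stated in full; the proofs are below) =====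
def Claim_equal_get_display_column : Prop := ∀ (column_name_list : List String), Dom_get_display_column column_name_list → Pre_get_display_column column_name_list → Spec_get_display_column column_name_list (get_display_column column_name_list)

-- ===== LEMMAS AND PROOFS =====

-- the "merge" the B loop performs on its best accumulator
def pvMerge : Option (Nat × String) → Option (Nat × String) → Option (Nat × String)
  | none, c => c
  | some b, none => some b
  | some b, some c => if c.1 < b.1 then some c else some b

def pvIdxOpt (col : String) : Option (Nat × String) :=
  match pvPrioDict.get? col with
  | some i => some (i, col)
  | none => none

def pvBestOf : List String → Option (Nat × String)
  | [] => none
  | col :: rest => pvMerge (pvIdxOpt col) (pvBestOf rest)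

lemma pvMerge_none_left (c : Option (Nat × String)) : pvMerge none c = c := by cases c <;> rfl

lemma pvMerge_assoc (a b c : Option (Nat × String)) :
    pvMerge (pvMerge a b) c = pvMerge a (pvMerge b c) := by
  rcases a with _ | ⟨ia, xa⟩ <;> rcases b with _ | ⟨ib, xb⟩ <;> rcases c with _ | ⟨ic, xc⟩ <;>
    simp only [pvMerge] <;> split_ifs <;>
      first | rfl | omega | (simp only [pvMerge]; split_ifs <;> first | rfl | omega)

lemma pvLoopB_fst (l : List String) (b : Option (Nat × String)) (s : Option String) :
    (pvLoopB l b s).1 = pvMerge b (pvBestOf l) := by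
  induction l generalizing b s with
  | nil => cases b <;> rfl
  | cons col rest ih =>
    simp only [pvLoopB, pvBestOf]
    rw [ih, ← pvMerge_assoc]
    congr 1
    simp only [pvIdxOpt]
    cases h : pvPrioDict.get? col <;> cases b <;> simp [pvMerge]

lemma pvLoopB_snd (l : List String) (b : Option (Nat × String)) (s : Option String) :
    (pvLoopB l b s).2 = (match s with | some y => some y | none => pvPhase2 l) := by
  induction l generalizing b s with
  | nil => cases s <;> rfl
  | cons col rest ih =>
    cases s with
    | some y => simp only [pvLoopB]; rw [ih]
    | none =>
      simp only [pvLoopB, pvPhase2]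
      rw [ih]
      have : pvCondB col = pvCondA col := rfl
      rw [this]
      cases h : pvCondA col <;> simp

-- dictionary characterisation
lemma pvIdx_get (col : String) (i : Nat) (h : pvPrioDict.get? col = some i) :
    pvPriorities[i]? = some col := by
  simp only [pvPrioDict, PySem.Dict.get?, List.find?] at h
  repeat' split at h
  all_goals simp_all [pvPriorities]
  all_goals (subst h; rfl)

lemma pvGet_idx (i : Nat) (col : String) (h : pvPriorities[i]? = some col) :
    pvPrioDict.get? col = some i := by
  match i with
  | 0 | 1 | 2 | 3 | 4 | 5 =>
    simp [pvPriorities] at h; subst h; decide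
  | (n + 6) => simp [pvPriorities] at h

lemma pvIdx_none_not_mem (p : String) (h : pvPrioDict.get? p = none) : p ∉ pvPriorities := by
  intro hm
  fin_cases hm <;> revert h <;> decide

-- A-side characterisation of phase 1
lemma pvPhase1_none (ps l : List String) (h : ∀ p ∈ ps, p ∉ l) : pvPhase1 ps l = none := by
  induction ps with
  | nil => rfl
  | cons p ps ih =>
    have hp : p ∉ l := h p (by simp)
    simp only [pvPhase1]
    rw [if_neg (by simpa using hp)]
    exact ih (fun q hq => h q (by simp [hq]))

lemma pvPhase1_first (ps l : List String) (i : Nat) (p : String)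
    (hget : ps[i]? = some p) (hmem : p ∈ l)
    (hmin : ∀ j < i, ∀ q, ps[j]? = some q → q ∉ l) :
    pvPhase1 ps l = some p := by
  induction ps generalizing i with
  | nil => simp at hget
  | cons a ps ih =>
    cases i with
    | zero =>
      simp at hget; subst hget
      simp only [pvPhase1]
      rw [if_pos (by simpa using hmem)]
    | succ i =>
      have ha : a ∉ l := hmin 0 (Nat.succ_pos _) a rfl
      simp only [pvPhase1]
      rw [if_neg (by simpa using ha)]
      exact ih i (by simpa using hget)
        (fun j hj q hq => hmin (j + 1) (by omega) q (by simpa using hq))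

-- B-side characterisation of the best accumulator
lemma pvBestOf_none (l : List String) (h : pvBestOf l = none) :
    ∀ col ∈ l, pvPrioDict.get? col = none := by
  induction l with
  | nil => simp
  | cons col rest ih =>
    simp only [pvBestOf] at h
    have h1 : pvIdxOpt col = none ∧ pvBestOf rest = none := by
      cases ha : pvIdxOpt col <;> cases hr : pvBestOf rest <;> rw [ha, hr] at h <;>
        first
        | exact ⟨rfl, rfl⟩
        | (exfalso; revert h; simp only [pvMerge]; split_ifs <;> simp)
        | (exfalso; revert h; simp only [pvMerge]; simp)
    intro c hc
    rcases List.mem_cons.mp hc with rfl | hc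
    · have := h1.1
      simp only [pvIdxOpt] at this
      cases hg : pvPrioDict.get? c <;> simp_all
    · exact ih h1.2 c hc

lemma pvBestOf_some (l : List String) (i : Nat) (x : String)
    (h : pvBestOf l = some (i, x)) :
    pvPrioDict.get? x = some i ∧ x ∈ l ∧
      ∀ col ∈ l, ∀ j, pvPrioDict.get? col = some j → i ≤ j := by
  induction l generalizing i x with
  | nil => simp [pvBestOf] at h
  | cons col rest ih =>
    simp only [pvBestOf] at h
    cases ha : pvIdxOpt col with
    | none =>
      rw [ha, pvMerge_none_left] at h
      obtain ⟨hx, hmem, hmin⟩ := ih i x h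
      refine ⟨hx, by simp [hmem], ?_⟩
      intro c hc j hj
      rcases List.mem_cons.mp hc with rfl | hc
      · simp only [pvIdxOpt] at ha
        cases hg : pvPrioDict.get? c <;> simp_all
      · exact hmin c hc j hj
    | some a =>
      obtain ⟨ic, colv⟩ := a
      have hacol : pvPrioDict.get? col = some ic ∧ colv = col := by
        simp only [pvIdxOpt] at ha
        cases hg : pvPrioDict.get? col <;> simp_all
      obtain ⟨hic, rfl⟩ := hacol
      cases hr : pvBestOf rest with
      | none =>
        rw [ha, hr] at h
        simp [pvMerge] at h
        obtain ⟨rfl, rfl⟩ := h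
        refine ⟨hic, by simp, ?_⟩
        intro c hc j hj
        rcases List.mem_cons.mp hc with rfl | hc
        · rw [hic] at hj; simp at hj; omega
        · have := pvBestOf_none rest hr c hc
          rw [this] at hj; simp at hj
      | some b =>
        obtain ⟨ir, xr⟩ := b
        obtain ⟨hxr, hmemr, hminr⟩ := ih ir xr hr
        rw [ha, hr] at h
        simp only [pvMerge] at h
        split_ifs at h with hlt <;> simp at h <;> obtain ⟨rfl, rfl⟩ := h
        · refine ⟨hxr, by simp [hmemr], ?_⟩
          intro c hc j hj
          rcases List.mem_cons.mp hc with rfl | hc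
          · rw [hic] at hj; simp at hj; omega
          · exact hminr c hc j hj
        · refine ⟨hic, by simp, ?_⟩
          intro c hc j hj
          rcases List.mem_cons.mp hc with rfl | hc
          · rw [hic] at hj; simp at hj; omega
          · have := hminr c hc j hj
            omega

-- the two phase-1 mechanisms agree
lemma pvPhase1_eq_bestOf (l : List String) :
    pvPhase1 pvPriorities l = (pvBestOf l).map Prod.snd := by
  cases h : pvBestOf l with
  | none =>
    simp only [Option.map_none]
    apply pvPhase1_none
    intro p hp hl
    have hnone := pvBestOf_none l h p hl
    exact pvIdx_none_not_mem p hnone hp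
  | some b =>
    obtain ⟨i, x⟩ := b
    obtain ⟨hx, hmem, hmin⟩ := pvBestOf_some l i x h
    simp only [Option.map_some]
    apply pvPhase1_first pvPriorities l i x (pvIdx_get x i hx) hmem
    intro j hj q hq hql
    have : pvPrioDict.get? q = some j := pvGet_idx j q hq
    have := hmin q hql j this
    omega

-- ===== VERDICT (by name: the statement is the Claim_ definition above) =====
theorem get_display_column_spec : Claim_equal_get_display_column := by
  intro l _ _
  unfold Spec_get_display_column get_display_column get_display_column_alt
  have h1 : pvLoopB l none none = (pvBestOf l, pvPhase2 l) := by
    have hf := pvLoopB_fst l none none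
    have hs := pvLoopB_snd l none none
    rw [pvMerge_none_left] at hf
    exact Prod.ext hf hs
  rw [h1, pvPhase1_eq_bestOf]
  cases hb : pvBestOf l with
  | none => cases hp : pvPhase2 l <;> simp
  | some b => simp
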